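-- pv_equiv track=rewrite | github.com/R06NV4LDR/fictional-invention | Codierung/lzw.py | lzw_encode_inline
-- ===== SOURCE A (Python) =====
-- def lzw_encode_inline(input_string):
--     dict_size = 256
--     dictionary = {chr(i): i for i in range(dict_size)}
--     w = ""
--     output = []
--
--     for c in input_string:
--         wc = w + c
--         if wc in dictionary:
--             w = wc
--         else:
--             # Output previous part
--             if len(w) == 1:
--                 output.append(w)
--             else:
--                 # Output the dictionary code for w (if it's not a single char)
--                 output.append(str(dictionary[w]))
--             # Output the current char if not part of the code
--             # Add new substring to the dictionary
--             dictionary[wc] = dict_size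
--             dict_size += 1
--             w = c
--     # Output the last code or character
--     if w:
--         if len(w) == 1:
--             output.append(w)
--         else:
--             output.append(str(dictionary[w]))
--     return "".join(output)
-- ===== SOURCE B (Python) =====
-- def lzw_encode_inline(input_string):
--     # Greedy longest-match LZW: from each phrase start, walk an explicit trie
--     # (children[k] holds the children of trie node k) as far as it matches,
--     # emit one token per phrase, then graft the mismatching char as a new node.
--     root = {chr(k): k for k in range(256)}
--     children = [{} for _ in range(256)]
--     pieces = []
--     n = len(input_string)
--     i = 0
--     while i < n:
--         code = root[input_string[i]]
--         j = i + 1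
--         while j < n and input_string[j] in children[code]:
--             code = children[code][input_string[j]]
--             j += 1
--         pieces.append(input_string[i] if j == i + 1 else str(code))
--         if j < n:
--             children[code][input_string[j]] = len(children)
--             children.append({})
--         i = j
--     return "".join(pieces)
-- ===== Notes on version B (the rewrite author's own statement) =====
-- stated objective: alternative
-- what changed: B replaces A's streaming char-by-char loop with a growing phrase string by a phrase-at-a-time greedy longest-match: an outer loop over phrase start positions and an inner walk through an explicit trie (a list of per-node child dicts), emitting one token per phrase and grafting the mismatching char as a new trie node, so no substring is ever built or hashed.
import Mathlib
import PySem

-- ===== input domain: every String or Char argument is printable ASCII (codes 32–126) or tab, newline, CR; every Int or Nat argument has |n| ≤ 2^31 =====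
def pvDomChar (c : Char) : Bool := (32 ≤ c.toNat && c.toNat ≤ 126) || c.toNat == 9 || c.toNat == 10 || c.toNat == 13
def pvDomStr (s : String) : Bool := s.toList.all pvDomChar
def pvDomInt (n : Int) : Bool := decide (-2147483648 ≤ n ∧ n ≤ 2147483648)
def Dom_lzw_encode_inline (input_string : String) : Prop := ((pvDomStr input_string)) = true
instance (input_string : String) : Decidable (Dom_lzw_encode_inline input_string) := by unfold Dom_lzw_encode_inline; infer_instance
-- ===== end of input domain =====

-- B replaces A's streaming loop with a growing phrase string by a phrase-at-a-time greedy
-- longest-match over an explicit trie (list of per-node child dicts) (objective: alternative).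


-- ===== PORT A =====
-- dictionary = {chr(i): i for i in range(256)}  (keys kept as List Char, exact for str)
def lzwAInit : PySem.Dict (List Char) Int :=
  (List.range 256).foldl (fun d i => d.insert [Char.ofNat i] (i : Int)) PySem.Dict.empty

-- one iteration of A's for-loop; state = (dictionary, dict_size, w, output)
-- (dictionary[w] is ported as getD _ 0: on the admitted domain the key is always present)
def lzwAStep (st : PySem.Dict (List Char) Int × Int × List Char × List (List Char)) (c : Char) :
    PySem.Dict (List Char) Int × Int × List Char × List (List Char) :=
  match st with
  | (d, size, w, out) =>
    let wc := w ++ [c]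
    if (d.get? wc).isSome then (d, size, wc, out)
    else (d.insert wc size, size + 1, [c],
          out ++ [if w.length = 1 then w else (PySem.Int.toStr (d.getD w 0)).toList])

def lzw_encode_inline (input_string : String) : String :=
  match input_string.toList.foldl lzwAStep (lzwAInit, 256, ([] : List Char), ([] : List (List Char))) with
  | (d, _, w, out) =>
    let out' := if w ≠ [] then
        out ++ [if w.length = 1 then w else (PySem.Int.toStr (d.getD w 0)).toList]
      else out
    String.ofList out'.flatten

-- ===== PORT B =====
-- root = {chr(k): k for k in range(256)}
def lzwBRoot : PySem.Dict (List Char) Int :=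
  (List.range 256).foldl (fun d i => d.insert [Char.ofNat i] (i : Int)) PySem.Dict.empty

-- B's inner while: walk the trie from node `code` while the next char has an edge;
-- returns the final node's code and the unconsumed suffix
def lzwWalk (children : List (PySem.Dict Char Int)) : Int → List Char → Int × List Char
  | code, [] => (code, [])
  | code, c :: rest =>
    match (children.getD code.toNat PySem.Dict.empty).get? c with
    | some k => lzwWalk children k rest
    | none => (code, c :: rest)

-- needed by lzwOuter's decreasing_by: the walk never lengthens the suffix
lemma lzwWalk_len (children : List (PySem.Dict Char Int)) (code : Int) (cs : List Char) :
    (lzwWalk children code cs).2.length ≤ cs.length := by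
  induction cs generalizing code with
  | nil => simp [lzwWalk]
  | cons c rest ih =>
      rw [lzwWalk]
      cases (children.getD code.toNat PySem.Dict.empty).get? c with
      | some k => exact le_trans (ih k) (by simp)
      | none => simp

-- B's outer while: one iteration per phrase (root[input[i]] is ported with a default -1:
-- in Python a missing key raises KeyError, which no char of the ASCII domain reaches)
def lzwOuter : List (PySem.Dict Char Int) → List (List Char) → List Char → List (List Char)
  | _, pieces, [] => pieces
  | children, pieces, c :: cs =>
    let code0 := lzwBRoot.getD [c] (-1)
    match h : lzwWalk children code0 cs with
    | (code, rest) =>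
      let piece := if rest.length = cs.length then [c] else (PySem.Int.toStr code).toList
      match rest with
      | [] => pieces ++ [piece]
      | e :: rest' =>
        lzwOuter
          ((children.set code.toNat
              ((children.getD code.toNat PySem.Dict.empty).insert e (children.length : Int)))
            ++ [PySem.Dict.empty])
          (pieces ++ [piece]) (e :: rest')
  termination_by _ _ cs => cs.length
  decreasing_by
    have hl := lzwWalk_len children (lzwBRoot.getD [c] (-1)) cs
    rw [h] at hl
    simp only [List.length_cons] at hl ⊢
    omega

def lzw_encode_inline_alt (input_string : String) : String :=
  String.ofList ((lzwOuter (List.replicate 256 PySem.Dict.empty) [] input_string.toList).flatten)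

-- ===== PRECONDITION & SPEC =====
def Spec_lzw_encode_inline (input_string : String) (out : String) : Prop := out = lzw_encode_inline_alt input_string
instance (input_string : String) (out : String) : Decidable (Spec_lzw_encode_inline input_string out) := by unfold Spec_lzw_encode_inline; infer_instance

-- ===== CLAIM (what is proved, stated in full; the proofs are below) =====
def Claim_equal_lzw_encode_inline : Prop := ∀ (input_string : String), Dom_lzw_encode_inline input_string → Spec_lzw_encode_inline input_string (lzw_encode_inline input_string)

-- ===== LEMMAS AND PROOFS =====

-- the coupling invariant between A's dictionary and B's trie
def lzwInv (d : PySem.Dict (List Char) Int) (size : Int)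
    (children : List (PySem.Dict Char Int)) : Prop :=
  (∀ s k, d.get? s = some k → 0 ≤ k ∧ k < size) ∧
  (∀ s t k, d.get? s = some k → d.get? t = some k → s = t) ∧
  (∀ c : Char, c.toNat < 256 → d.get? [c] = some (c.toNat : Int)) ∧
  (∀ s c k, d.get? (s ++ [c]) = some k → s ≠ [] →
      ∃ j, d.get? s = some j ∧ (children.getD j.toNat PySem.Dict.empty).get? c = some k) ∧
  (∀ (jn : ℕ) (c : Char) (k : Int), (children.getD jn PySem.Dict.empty).get? c = some k →
      ∃ s, d.get? s = some ((jn : ℕ) : Int) ∧ d.get? (s ++ [c]) = some k) ∧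
  ((children.length : Int) = size) ∧ 256 ≤ size

lemma char_toNat_ofNat (i : ℕ) (h : i < 256) : (Char.ofNat i).toNat = i := by
  have hv : Nat.isValidChar i := Or.inl (by omega)
  rw [Char.toNat_ofNat, if_pos hv]

lemma lzwAInit_get?_aux (n : ℕ) (hn : n ≤ 256) (s : List Char) :
    ((List.range n).foldl (fun d i => d.insert [Char.ofNat i] (i : Int)) PySem.Dict.empty).get? s
      = match s with
        | [c] => if c.toNat < n then some (c.toNat : Int) else none
        | _ => none := by
  induction n with
  | zero =>
      simp only [List.range_zero, List.foldl_nil, PySem.Dict.get?_empty]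
      cases s with
      | nil => rfl
      | cons c t => cases t <;> simp
  | succ n ih =>
      rw [List.range_succ, List.foldl_append, List.foldl_cons, List.foldl_nil,
        PySem.Dict.get?_insert, ih (by omega)]
      cases s with
      | nil => simp
      | cons c t =>
        cases t with
        | nil =>
            simp only
            by_cases hc : c = Char.ofNat n
            · subst hc
              rw [if_pos rfl, char_toNat_ofNat n (by omega), if_pos (by omega)]
            · rw [if_neg (by simpa using hc)]
              have hne : c.toNat ≠ n := by
                intro h; apply hc; rw [← h]; exact (Char.ofNat_toNat c).symm
              split_ifs with h1 h2 h2 <;> first | rfl | omega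
        | cons c' t' => simp

lemma lzwAInit_get? (s : List Char) :
    lzwAInit.get? s
      = match s with
        | [c] => if c.toNat < 256 then some (c.toNat : Int) else none
        | _ => none := lzwAInit_get?_aux 256 le_rfl s

lemma lzwBRoot_getD (c : Char) (hc : c.toNat < 256) :
    lzwBRoot.getD [c] (-1) = (c.toNat : Int) := by
  have h : lzwBRoot.get? [c] = some ((c.toNat : ℕ) : Int) := by
    show lzwAInit.get? [c] = _
    rw [lzwAInit_get?]; simp [hc]
  rw [PySem.Dict.getD_eq_get?_getD, h]; rfl

-- getD on the grafted trie
lemma getD_graft_self (l : List (PySem.Dict Char Int)) (i : ℕ) (x y : PySem.Dict Char Int)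
    (hi : i < l.length) :
    (l.set i x ++ [y]).getD i PySem.Dict.empty = x := by
  rw [List.getD_eq_getElem?_getD, List.getElem?_append_left (by simpa using hi),
    List.getElem?_set_self hi]
  rfl

lemma getD_graft_other (l : List (PySem.Dict Char Int)) (i j : ℕ) (x y : PySem.Dict Char Int)
    (hj : j ≠ i) (hjl : j < l.length) :
    (l.set i x ++ [y]).getD j PySem.Dict.empty = l.getD j PySem.Dict.empty := by
  rw [List.getD_eq_getElem?_getD, List.getD_eq_getElem?_getD,
    List.getElem?_append_left (by simpa using hjl), List.getElem?_set_ne (by omega)]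

lemma getD_graft_high (l : List (PySem.Dict Char Int)) (i j : ℕ) (x : PySem.Dict Char Int)
    (hjl : l.length ≤ j) :
    (l.set i x ++ [PySem.Dict.empty]).getD j PySem.Dict.empty = PySem.Dict.empty := by
  rw [List.getD_eq_getElem?_getD, List.getElem?_append_right (by simpa using hjl)]
  cases Nat.lt_or_ge (j - (l.set i x).length) 1 with
  | inl h =>
      have h0 : j - (l.set i x).length = 0 := by omega
      rw [h0]; simp
  | inr h => rw [List.getElem?_eq_none (by simpa using h)]; rfl

-- the invariant survives one phrase boundary (A inserts w'++[e]; B grafts edge e at node code')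
lemma lzwInv_step (d : PySem.Dict (List Char) Int) (size : Int)
    (children : List (PySem.Dict Char Int)) (w' : List Char) (code' : Int) (e : Char)
    (hInv : lzwInv d size children) (hw : w' ≠ [])
    (hcode : d.get? w' = some code')
    (hnone : d.get? (w' ++ [e]) = none)
    (hstop : (children.getD code'.toNat PySem.Dict.empty).get? e = none) :
    lzwInv (d.insert (w' ++ [e]) size) (size + 1)
      ((children.set code'.toNat
          ((children.getD code'.toNat PySem.Dict.empty).insert e (children.length : Int)))
        ++ [PySem.Dict.empty]) := by
  obtain ⟨hVals, hInj, hSingle, hFwd, hBwd, hLen, hSz⟩ := hInv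
  have h0code : 0 ≤ code' := (hVals w' code' hcode).1
  have hcodeLt : code' < size := (hVals w' code' hcode).2
  have hcn : code'.toNat < children.length := by omega
  have hcast : ((code'.toNat : ℕ) : Int) = code' := Int.toNat_of_nonneg h0code
  have hkey_ne : w' ≠ w' ++ [e] := by
    intro h; apply_fun List.length at h; simp at h
  have hsingle_ne : ∀ c' : Char, [c'] ≠ w' ++ [e] := by
    intro c' h; apply_fun List.length at h
    simp only [List.length_cons, List.length_append, List.length_nil] at h
    have := List.length_pos_of_ne_nil hw
    omega
  refine ⟨?_, ?_, ?_, ?_, ?_, ?_, by omega⟩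
  · -- values bounded
    intro s k hk
    rw [PySem.Dict.get?_insert] at hk
    split_ifs at hk with heq
    · injection hk with hk; omega
    · have := hVals s k hk; omega
  · -- injectivity
    intro s t k hs ht
    rw [PySem.Dict.get?_insert] at hs ht
    split_ifs at hs ht with h1 h2 h2
    · rw [h1, h2]
    · injection hs with hs
      have := (hVals t k ht).2; omega
    · injection ht with ht
      have := (hVals s k hs).2; omega
    · exact hInj s t k hs ht
  · -- single chars
    intro c' h'
    rw [PySem.Dict.get?_insert, if_neg (hsingle_ne c')]
    exact hSingle c' h'
  · -- forward: dictionary entry → trie edge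
    intro s cc k hk hs_ne
    rw [PySem.Dict.get?_insert] at hk
    by_cases hkey : s ++ [cc] = w' ++ [e]
    · obtain ⟨hsw, hcc⟩ := List.append_inj' hkey (by simp)
      have hcc' : cc = e := by simpa using hcc
      subst hsw
      subst hcc'
      rw [if_pos rfl] at hk
      injection hk with hk
      refine ⟨code', ?_, ?_⟩
      · rw [PySem.Dict.get?_insert, if_neg hkey_ne]; exact hcode
      · rw [getD_graft_self children code'.toNat _ _ hcn, PySem.Dict.get?_insert_self,
          hLen, hk]
    · rw [if_neg hkey] at hk
      obtain ⟨j, hj, hpj⟩ := hFwd s cc k hk hs_ne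
      have hs_ne_key : s ≠ w' ++ [e] := by
        intro hh; rw [hh, hnone] at hj; cases hj
      have h0j : 0 ≤ j := (hVals s j hj).1
      have hjLt : j < size := (hVals s j hj).2
      refine ⟨j, by rw [PySem.Dict.get?_insert, if_neg hs_ne_key]; exact hj, ?_⟩
      by_cases hjc : j.toNat = code'.toNat
      · have hjc' : j = code' := by omega
        rw [hjc'] at hpj
        rw [hjc']
        rw [getD_graft_self children code'.toNat _ _ hcn]
        have hcc_ne : cc ≠ e := by
          intro hh; rw [hh, hstop] at hpj; cases hpj
        rw [PySem.Dict.get?_insert, if_neg hcc_ne]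
        exact hpj
      · have hjl : j.toNat < children.length := by omega
        rw [getD_graft_other children code'.toNat j.toNat _ _ hjc hjl]
        exact hpj
  · -- backward: trie edge → dictionary entry
    intro jn cc k hk
    by_cases hjn : jn = code'.toNat
    · subst hjn
      rw [getD_graft_self children code'.toNat _ _ hcn, PySem.Dict.get?_insert] at hk
      by_cases hcc : cc = e
      · subst hcc
        rw [if_pos rfl] at hk
        injection hk with hk
        refine ⟨w', ?_, ?_⟩
        · rw [hcast, PySem.Dict.get?_insert, if_neg hkey_ne]; exact hcode
        · rw [PySem.Dict.get?_insert_self, ← hk, hLen]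
      · rw [if_neg hcc] at hk
        obtain ⟨s, hs, hsc⟩ := hBwd code'.toNat cc k hk
        have h1 : s ≠ w' ++ [e] := by
          intro hh; rw [hh, hnone] at hs; cases hs
        have h2 : s ++ [cc] ≠ w' ++ [e] := by
          intro hh; rw [hh, hnone] at hsc; cases hsc
        exact ⟨s, by rw [PySem.Dict.get?_insert, if_neg h1]; exact hs,
          by rw [PySem.Dict.get?_insert, if_neg h2]; exact hsc⟩
    · by_cases hjl : jn < children.length
      · rw [getD_graft_other children code'.toNat jn _ _ hjn hjl] at hk
        obtain ⟨s, hs, hsc⟩ := hBwd jn cc k hk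
        have h1 : s ≠ w' ++ [e] := by
          intro hh; rw [hh, hnone] at hs; cases hs
        have h2 : s ++ [cc] ≠ w' ++ [e] := by
          intro hh; rw [hh, hnone] at hsc; cases hsc
        exact ⟨s, by rw [PySem.Dict.get?_insert, if_neg h1]; exact hs,
          by rw [PySem.Dict.get?_insert, if_neg h2]; exact hsc⟩
      · rw [getD_graft_high children code'.toNat jn _ (by omega)] at hk
        rw [PySem.Dict.get?_empty] at hk
        cases hk
  · -- size of the trie
    simp only [List.length_append, List.length_set, List.length_cons, List.length_nil]
    push_cast
    omega

lemma lzwInv_init : lzwInv lzwAInit 256 (List.replicate 256 PySem.Dict.empty) := by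
  refine ⟨?_, ?_, ?_, ?_, ?_, by rw [List.length_replicate]; norm_num, le_refl _⟩
  · intro s k hk
    rw [lzwAInit_get?] at hk
    rcases s with - | ⟨a, - | ⟨b, t⟩⟩
    · cases hk
    · change (if a.toNat < 256 then some ((a.toNat : Int)) else none) = some k at hk
      split_ifs at hk with h
      injection hk with hk; omega
    · cases hk
  · intro s t k hs ht
    rw [lzwAInit_get?] at hs; rw [lzwAInit_get?] at ht
    rcases s with - | ⟨a, - | ⟨a2, s'⟩⟩
    · cases hs
    · rcases t with - | ⟨b, - | ⟨b2, t'⟩⟩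
      · cases ht
      · change (if a.toNat < 256 then some ((a.toNat : Int)) else none) = some k at hs
        change (if b.toNat < 256 then some ((b.toNat : Int)) else none) = some k at ht
        split_ifs at hs ht with h1 h2
        · injection hs with hs; injection ht with ht
          have hab : a.toNat = b.toNat := by omega
          rw [← Char.ofNat_toNat a, hab, Char.ofNat_toNat]
      · cases ht
    · cases hs
  · intro c hc
    rw [lzwAInit_get?]; simp [hc]
  · intro s c k hk hs
    rcases s with - | ⟨a, - | ⟨b, t⟩⟩
    · exact absurd rfl hs
    · rw [lzwAInit_get?] at hk; cases hk
    · rw [lzwAInit_get?] at hk; cases hk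
  · intro jn c k hk
    rw [List.getD_eq_getElem?_getD, List.getElem?_replicate] at hk
    split_ifs at hk with h
    · rw [Option.getD_some, PySem.Dict.get?_empty] at hk; cases hk
    · rw [Option.getD_none, PySem.Dict.get?_empty] at hk; cases hk

-- A's fold follows B's trie walk exactly while the phrase keeps extending
lemma lzwWalkSim (cs : List Char) : ∀ (code : Int) (w : List Char)
    (d : PySem.Dict (List Char) Int) (size : Int) (out : List (List Char))
    (children : List (PySem.Dict Char Int)),
    lzwInv d size children → w ≠ [] → d.get? w = some code →
    ∃ t code' rest, lzwWalk children code cs = (code', rest) ∧ cs = t ++ rest ∧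
      cs.foldl lzwAStep (d, size, w, out) = rest.foldl lzwAStep (d, size, w ++ t, out) ∧
      d.get? (w ++ t) = some code' ∧
      (∀ e rest', rest = e :: rest' →
        (children.getD code'.toNat PySem.Dict.empty).get? e = none) := by
  induction cs with
  | nil =>
      intro code w d size out children hInv hw hcode
      exact ⟨[], code, [], rfl, rfl, by simp, by simpa, by intro e r' h; cases h⟩
  | cons c rest ih =>
      intro code w d size out children hInv hw hcode
      obtain ⟨hVals, hInj, hSingle, hFwd, hBwd, hLen, hSz⟩ := hInv
      cases hlook : (children.getD code.toNat PySem.Dict.empty).get? c with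
      | some k =>
          -- the trie edge corresponds to a dictionary entry w ++ [c] ↦ k
          obtain ⟨s, hs, hsc⟩ := hBwd code.toNat c k hlook
          have hcast : ((code.toNat : ℕ) : Int) = code := by
            have := (hVals w code hcode).1
            omega
          rw [hcast] at hs
          have hsw : s = w := hInj s w code hs hcode
          rw [hsw] at hsc
          have hstepA : lzwAStep (d, size, w, out) c = (d, size, w ++ [c], out) := by
            simp [lzwAStep, hsc]
          obtain ⟨t', code', rest', hwalk, hsplit, hfold, hget, hstop⟩ :=
            ih k (w ++ [c]) d size out children
              ⟨hVals, hInj, hSingle, hFwd, hBwd, hLen, hSz⟩ (by simp) hsc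
          refine ⟨c :: t', code', rest', ?_, ?_, ?_, ?_, hstop⟩
          · rw [lzwWalk, hlook]; exact hwalk
          · rw [hsplit]; rfl
          · rw [List.foldl_cons, hstepA, hfold]; simp
          · rw [List.append_cons]; exact hget
      | none =>
          refine ⟨[], code, c :: rest, ?_, rfl, by simp, by simpa, ?_⟩
          · rw [lzwWalk, hlook]
          · intro e r' h
            injection h with h1 h2
            subst h1
            exact hlook

lemma lzwOuter_last (children : List (PySem.Dict Char Int)) (pieces : List (List Char))
    (c : Char) (cs : List Char) (code : Int)
    (hw : lzwWalk children (lzwBRoot.getD [c] (-1)) cs = (code, [])) :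
    lzwOuter children pieces (c :: cs) =
      pieces ++ [if (0 : ℕ) = cs.length then [c] else (PySem.Int.toStr code).toList] := by
  rw [lzwOuter]
  split
  next code2 rest2 h =>
    rw [hw] at h
    injection h with h1 h2
    subst h1
    subst h2
    simp

lemma lzwOuter_step (children : List (PySem.Dict Char Int)) (pieces : List (List Char))
    (c : Char) (cs : List Char) (code : Int) (e : Char) (rest' : List Char)
    (hw : lzwWalk children (lzwBRoot.getD [c] (-1)) cs = (code, e :: rest')) :
    lzwOuter children pieces (c :: cs) =
      lzwOuter
        ((children.set code.toNat
            ((children.getD code.toNat PySem.Dict.empty).insert e (children.length : Int)))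
          ++ [PySem.Dict.empty])
        (pieces ++ [if rest'.length + 1 = cs.length then [c] else (PySem.Int.toStr code).toList])
        (e :: rest') := by
  rw [lzwOuter]
  split
  next code2 rest2 h =>
    rw [hw] at h
    injection h with h1 h2
    subst h1
    subst h2
    simp

-- one whole phrase of B equals the corresponding stretch of A's fold, then recurse
lemma lzwPhrase : ∀ (n : ℕ) (cs : List Char), cs.length ≤ n →
    ∀ (c : Char) (d : PySem.Dict (List Char) Int) (size : Int)
      (out : List (List Char)) (children : List (PySem.Dict Char Int)),
    lzwInv d size children → (∀ x ∈ c :: cs, pvDomChar x = true) →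
    ∃ d' size' w o, cs.foldl lzwAStep (d, size, [c], out) = (d', size', w, o) ∧ w ≠ [] ∧
      o ++ [if w.length = 1 then w else (PySem.Int.toStr (d'.getD w 0)).toList]
        = lzwOuter children out (c :: cs) := by
  intro n
  induction n with
  | zero =>
      intro cs hlen c d size out children hInv hdom
      have hcs : cs = [] := List.eq_nil_of_length_eq_zero (Nat.le_zero.mp hlen)
      subst hcs
      refine ⟨d, size, [c], out, rfl, by simp, ?_⟩
      rw [lzwOuter_last children out c [] _ (by rw [lzwWalk])]
      simp
  | succ n ih =>
      intro cs hlen c d size out children hInv hdom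
      have hc256 : c.toNat < 256 := by
        have := hdom c (List.mem_cons_self ..)
        simp only [pvDomChar, Bool.or_eq_true, Bool.and_eq_true, decide_eq_true_eq,
          beq_iff_eq] at this
        omega
      have hcode : d.get? [c] = some ((c.toNat : ℕ) : Int) := hInv.2.2.1 c hc256
      obtain ⟨t, code', rest, hwalk, hsplit, hfold, hget, hstop⟩ :=
        lzwWalkSim cs ((c.toNat : ℕ) : Int) [c] d size out children hInv (by simp) hcode
      have hget' : d.get? (c :: t) = some code' := by simpa using hget
      have hwalk' : lzwWalk children (lzwBRoot.getD [c] (-1)) cs = (code', rest) := by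
        rw [lzwBRoot_getD c hc256]; exact hwalk
      cases rest with
      | nil =>
          have hcst : cs = t := by simpa using hsplit
          refine ⟨d, size, c :: t, out, by rw [hfold]; simp, by simp, ?_⟩
          rw [lzwOuter_last children out c cs code' hwalk']
          by_cases ht : t = []
          · subst ht
            subst hcst
            simp
          · have htl : 0 < t.length := List.length_pos_of_ne_nil ht
            rw [if_neg (by simp only [List.length_cons]; omega),
              if_neg (by rw [hcst]; omega)]
            rw [PySem.Dict.getD_eq_get?_getD, hget', Option.getD_some]
      | cons e rest' =>
          have hstopE := hstop e rest' rfl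
          have hwc_none : d.get? ((c :: t) ++ [e]) = none := by
            cases heq : d.get? ((c :: t) ++ [e]) with
            | none => rfl
            | some k =>
                obtain ⟨j, hj, hnode⟩ := hInv.2.2.2.1 (c :: t) e k heq (by simp)
                rw [hget'] at hj
                injection hj with hj
                rw [← hj] at hnode
                rw [hstopE] at hnode
                cases hnode
          have hdomE : ∀ x ∈ e :: rest', pvDomChar x = true := by
            intro x hx
            apply hdom
            rw [hsplit]
            exact List.mem_cons_of_mem _ (List.mem_append_right t hx)
          have hlen' : rest'.length ≤ n := by
            have := congrArg List.length hsplit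
            simp only [List.length_append, List.length_cons] at this
            omega
          -- A's token at the phrase boundary = B's piece
          have hpiece : (if (c :: t).length = 1 then c :: t
                else (PySem.Int.toStr (d.getD (c :: t) 0)).toList)
              = (if rest'.length + 1 = cs.length then [c]
                else (PySem.Int.toStr code').toList) := by
            have hcl : cs.length = t.length + rest'.length + 1 := by
              have := congrArg List.length hsplit
              simp only [List.length_append, List.length_cons] at this
              omega
            by_cases ht : t = []
            · subst ht
              simp [hcl]
            · have htl : 0 < t.length := List.length_pos_of_ne_nil ht
              rw [if_neg (by simp; omega), if_neg (by omega)]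
              rw [PySem.Dict.getD_eq_get?_getD, hget', Option.getD_some]
          have hstepA : lzwAStep (d, size, c :: t, out) e
              = (d.insert ((c :: t) ++ [e]) size, size + 1, [e],
                 out ++ [if rest'.length + 1 = cs.length then [c]
                   else (PySem.Int.toStr code').toList]) := by
            simp only [lzwAStep, hwc_none, Option.isSome_none, Bool.false_eq_true, if_false]
            rw [hpiece]
          have hInv' := lzwInv_step d size children (c :: t) code' e hInv (by simp)
            hget' hwc_none hstopE
          obtain ⟨d', size', w, o, heq, hw, htok⟩ :=
            ih rest' hlen' e (d.insert ((c :: t) ++ [e]) size) (size + 1)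
              (out ++ [if rest'.length + 1 = cs.length then [c]
                 else (PySem.Int.toStr code').toList])
              _ hInv' hdomE
          refine ⟨d', size', w, o, ?_, hw, ?_⟩
          · rw [hfold]
            simp only [List.singleton_append]
            rw [List.foldl_cons, hstepA, heq]
          · rw [htok, lzwOuter_step children out c cs code' e rest' hwalk']

-- ===== VERDICT (by name: the statement is the Claim_ definition above) =====
theorem lzw_encode_inline_spec : Claim_equal_lzw_encode_inline := by
  intro input hDom
  unfold Spec_lzw_encode_inline lzw_encode_inline lzw_encode_inline_alt
  have hcs : ∀ c ∈ input.toList, pvDomChar c = true := by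
    have h := hDom
    unfold Dom_lzw_encode_inline pvDomStr at h
    simpa [List.all_eq_true] using h
  cases hL : input.toList with
  | nil => simp [lzwOuter]
  | cons c cs =>
      have hc : c.toNat < 256 := by
        have := hcs c (hL ▸ List.mem_cons_self ..)
        simp only [pvDomChar, Bool.or_eq_true, Bool.and_eq_true, decide_eq_true_eq,
          beq_iff_eq] at this
        omega
      have hget : lzwAInit.get? [c] = some ((c.toNat : ℕ) : Int) := by
        rw [lzwAInit_get?]; simp [hc]
      have hstep : lzwAStep (lzwAInit, 256, ([] : List Char), ([] : List (List Char))) c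
          = (lzwAInit, 256, [c], []) := by
        simp [lzwAStep, hget]
      rw [List.foldl_cons, hstep]
      obtain ⟨d', size', w, o, heq, hw, htok⟩ :=
        lzwPhrase cs.length cs le_rfl c lzwAInit 256 [] (List.replicate 256 PySem.Dict.empty)
          lzwInv_init (by intro x hx; exact hcs x (hL ▸ hx))
      rw [heq]
      simp only
      rw [if_pos hw, htok]
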